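-- pv_equiv track=rewrite | github.com/Tasfiul/url-shortener | hello_app/views.py | generate_short_code
-- ===== SOURCE A (Python) =====
-- def generate_short_code(id):
--     characters = "0123456789abcdefghijklmnopqrstuvwxyzABCDEFGHIJKLMNOPQRSTUVWXYZ"
--     base = len(characters)
--
--     short_code = []
--     while id > 0:
--         remainder = id % base
--         short_code.insert(0, characters[remainder])
--         id //= base
--
--     if not short_code:
--         return characters[0]
--
--     return "".join(short_code)
-- ===== SOURCE B (Python) =====
-- def generate_short_code(id):
--     characters = "0123456789abcdefghijklmnopqrstuvwxyzABCDEFGHIJKLMNOPQRSTUVWXYZ"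
--     base = len(characters)
--     if id < base:
--         return characters[id] if id > 0 else characters[0]
--     return generate_short_code(id // base) + characters[id % base]
-- ===== Notes on version B (the rewrite author's own statement) =====
-- stated objective: simpler
-- what changed: Replaces A's while-loop that builds a digit list by front-insertion and joins it with a direct recursion on the base quotient that concatenates the low digit after the recursive prefix.
import Mathlib
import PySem

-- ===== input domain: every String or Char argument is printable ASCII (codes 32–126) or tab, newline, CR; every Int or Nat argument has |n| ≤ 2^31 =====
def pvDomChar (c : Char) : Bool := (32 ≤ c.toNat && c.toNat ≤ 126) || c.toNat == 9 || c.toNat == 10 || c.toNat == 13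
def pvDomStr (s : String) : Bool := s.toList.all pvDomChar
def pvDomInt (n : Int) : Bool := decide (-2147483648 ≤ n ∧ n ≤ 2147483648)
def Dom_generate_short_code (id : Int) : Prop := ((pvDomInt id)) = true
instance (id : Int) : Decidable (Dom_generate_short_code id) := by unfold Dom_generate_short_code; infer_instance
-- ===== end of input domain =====

-- B replaces A's explicit while-loop with a front insertion list by a direct recursion on id // base (objective: simpler decomposition, same cost).

-- ===== PORT A =====
-- the shared alphabet constant 'characters'
def pvChars : List Char := "0123456789abcdefghijklmnopqrstuvwxyzABCDEFGHIJKLMNOPQRSTUVWXYZ".toList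

-- the 'while id > 0' loop of A, carrying the short_code list (insert at position 0 = cons)
def pvLoopA (id : Int) (sc : List Char) : List Char :=
  if id > 0 then
    pvLoopA (PySem.Int.floordiv id 62)
      (PySem.List.pyGetD pvChars (PySem.Int.mod id 62) '0' :: sc)
  else sc
termination_by id.toNat
decreasing_by
  simp only [PySem.Int.floordiv_eq_ediv_of_pos (by omega : (0:Int) < 62)]
  omega

def generate_short_code (id : Int) : String :=
  let sc := pvLoopA id []
  if sc = [] then String.singleton (PySem.List.pyGetD pvChars 0 '0')
  else String.ofList sc

-- ===== PORT B =====
def generate_short_code_alt (id : Int) : String :=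
  if id < 62 then
    if id > 0 then String.singleton (PySem.List.pyGetD pvChars id '0')
    else String.singleton (PySem.List.pyGetD pvChars 0 '0')
  else
    generate_short_code_alt (PySem.Int.floordiv id 62) ++
      String.singleton (PySem.List.pyGetD pvChars (PySem.Int.mod id 62) '0')
termination_by id.toNat
decreasing_by
  simp only [PySem.Int.floordiv_eq_ediv_of_pos (by omega : (0:Int) < 62)]
  omega

-- ===== PRECONDITION & SPEC =====
def Spec_generate_short_code (id : Int) (out : String) : Prop := out = generate_short_code_alt id
instance (id : Int) (out : String) : Decidable (Spec_generate_short_code id out) := by unfold Spec_generate_short_code; infer_instance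

-- ===== CLAIM (what is proved, stated in full; the proofs are below) =====
def Claim_equal_generate_short_code : Prop := ∀ (id : Int), Dom_generate_short_code id → Spec_generate_short_code id (generate_short_code id)

-- ===== LEMMAS AND PROOFS =====

-- B's string is never empty (it always ends with one digit character)
lemma alt_toList_ne_nil (id : Int) : (generate_short_code_alt id).toList ≠ [] := by
  unfold generate_short_code_alt
  split
  · split <;> simp [String.singleton]
  · simp [String.singleton]

-- the loop of A accumulates exactly B's digit string in front of the accumulator
lemma loopA_eq (n : Nat) : ∀ (id : Int), id.toNat ≤ n → 0 < id → ∀ acc,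
    pvLoopA id acc = (generate_short_code_alt id).toList ++ acc := by
  induction n with
  | zero => intro id hle hpos; omega
  | succ n ih =>
    intro id hle hpos acc
    rw [pvLoopA]
    simp only [hpos, if_true]
    by_cases hlt : id < 62
    · have hq : PySem.Int.floordiv id 62 = 0 := by
        rw [PySem.Int.floordiv_eq_ediv_of_pos (by omega)]; omega
      have hr : PySem.Int.mod id 62 = id := by
        rw [PySem.Int.mod_eq_emod_of_pos (by omega)]; omega
      rw [hq, pvLoopA, hr]
      conv_rhs => rw [generate_short_code_alt]
      simp [hlt, hpos, String.singleton]
    · have hq0 : 0 < PySem.Int.floordiv id 62 := by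
        rw [PySem.Int.floordiv_eq_ediv_of_pos (by omega)]; omega
      have hqn : (PySem.Int.floordiv id 62).toNat ≤ n := by
        rw [PySem.Int.floordiv_eq_ediv_of_pos (by omega)] at *; omega
      rw [ih _ hqn hq0]
      conv_rhs => rw [generate_short_code_alt]
      simp [hlt, String.singleton, List.append_assoc]

-- ===== VERDICT (by name: the statement is the Claim_ definition above) =====
theorem generate_short_code_spec : Claim_equal_generate_short_code := by
  intro id _
  unfold Spec_generate_short_code generate_short_code
  by_cases hpos : 0 < id
  · have h := loopA_eq id.toNat id le_rfl hpos []
    simp only [List.append_nil] at h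
    simp only [h, alt_toList_ne_nil, if_false]
    exact String.ofList_toList
  · rw [pvLoopA]
    simp only [hpos, if_false]
    rw [generate_short_code_alt]
    have : id < 62 := by omega
    simp [this, hpos]
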